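-- pv_equiv track=rewrite | github.com/poojavarshneya/algorithms | find_zero_sum_subset.py | sumZero
-- ===== SOURCE A (Python) =====
-- def sumZero(intArr):
--     l = len(intArr)
--     result = []
--
--     for i in range(l):
--         sum = 0
--         for j in range(i, l):
--             sum += intArr[j]
--             if sum == 0:
--                 result.append(",".join(map(str, intArr[i: j + 1])))
--                 break
--
--     return result
-- ===== SOURCE B (Python) =====
-- def sumZero(intArr):
--     n = len(intArr)
--     prefix = [0] * (n + 1)
--     for t in range(n):
--         prefix[t + 1] = prefix[t] + intArr[t]
--     # nxt maps a prefix value to the smallest index > current i at which it occurs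
--     nxt = {prefix[n]: n}
--     result = []
--     for i in range(n - 1, -1, -1):
--         k = nxt.get(prefix[i])
--         if k is not None:
--             result.append(",".join(map(str, intArr[i:k])))
--         nxt[prefix[i]] = i
--     result.reverse()
--     return result
-- ===== Notes on version B (the rewrite author's own statement) =====
-- stated objective: faster
-- what changed: Replaces A's O(n^2) restart-the-running-sum scan from every start index by one prefix-sum pass plus a single right-to-left sweep with a hash map from prefix value to the nearest later index carrying it (equal prefix sums delimit a zero-sum segment).
import Mathlib
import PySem

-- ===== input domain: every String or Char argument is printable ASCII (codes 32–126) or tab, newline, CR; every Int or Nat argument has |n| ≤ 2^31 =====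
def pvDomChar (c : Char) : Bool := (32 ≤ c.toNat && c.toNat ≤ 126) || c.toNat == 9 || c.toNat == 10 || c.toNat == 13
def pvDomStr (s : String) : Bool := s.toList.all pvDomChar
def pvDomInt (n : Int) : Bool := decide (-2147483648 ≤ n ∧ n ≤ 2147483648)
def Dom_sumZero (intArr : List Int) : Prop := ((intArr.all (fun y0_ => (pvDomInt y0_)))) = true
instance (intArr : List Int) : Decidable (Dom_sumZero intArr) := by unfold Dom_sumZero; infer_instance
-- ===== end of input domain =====

-- B replaces A's quadratic restart-the-sum-at-every-start scan by one prefix-sum pass with a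
-- hash map from prefix value to nearest later index (objective: faster, asymptotic).

-- ===== PORT A =====
-- inner 'for j in range(i, l)' loop: running sum, append-and-break at the first zero sum
def sumZeroGo (arr : List Int) (i : Int) : List Int → Int → List String → List String
  | [], _, result => result
  | j :: rest, s, result =>
    let s' := s + PySem.List.pyGetD arr j 0
    if s' = 0 then
      result ++ [PySem.Str.join "," ((PySem.List.slice arr (some i) (some (j + 1))).map PySem.Int.toStr)]
    else sumZeroGo arr i rest s' result

def sumZero (intArr : List Int) : List String :=
  (PySem.List.pyRange 0 (intArr.length : Int) 1).foldl
    (fun result i => sumZeroGo intArr i (PySem.List.pyRange i (intArr.length : Int) 1) 0 result) []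

-- ===== PORT B =====
-- prefix[0..n]: prefix[t+1] = prefix[t] + intArr[t]
def prefixSumsB (acc : Int) : List Int → List Int
  | [] => [acc]
  | x :: xs => acc :: prefixSumsB (acc + x) xs

-- 'for i in range(n-1, -1, -1)' loop: nxt maps a prefix value to the smallest index > i carrying it
def sumZeroAltGo (arr P : List Int) : List Int → PySem.Dict Int Int → List String → List String
  | [], _, result => result
  | i :: rest, nxt, result =>
    let pi := PySem.List.pyGetD P i 0
    let result' := match nxt.get? pi with
      | some k =>
          result ++ [PySem.Str.join "," ((PySem.List.slice arr (some i) (some k)).map PySem.Int.toStr)]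
      | none => result
    sumZeroAltGo arr P rest (nxt.insert pi i) result'

def sumZero_alt (intArr : List Int) : List String :=
  (sumZeroAltGo intArr (prefixSumsB 0 intArr)
      (PySem.List.pyRange ((intArr.length : Int) - 1) (-1) (-1))
      ((PySem.Dict.empty).insert
        (PySem.List.pyGetD (prefixSumsB 0 intArr) (intArr.length : Int) 0) (intArr.length : Int))
      []).reverse

-- ===== PRECONDITION & SPEC =====
def Spec_sumZero (intArr : List Int) (out : List String) : Prop := out = sumZero_alt intArr
instance (intArr : List Int) (out : List String) : Decidable (Spec_sumZero intArr out) := by unfold Spec_sumZero; infer_instance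

-- ===== CLAIM (what is proved, stated in full; the proofs are below) =====
def Claim_equal_sumZero : Prop := ∀ (intArr : List Int), Dom_sumZero intArr → Spec_sumZero intArr (sumZero intArr)

-- ===== LEMMAS AND PROOFS =====

-- prefix sum of the first k elements (the common spec both ports are reduced to)
def psum (arr : List Int) (k : Nat) : Int := (arr.take k).sum

-- the string emitted for the segment arr[i:k]
def strseg (arr : List Int) (i k : Nat) : String :=
  PySem.Str.join "," ((PySem.List.slice arr (some (i : Int)) (some (k : Int))).map PySem.Int.toStr)

-- contribution of start index i when scanning ends k = t+1 .. arr.length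
def gsegFrom (arr : List Int) (i t : Nat) : List String :=
  match (List.range' (t + 1) (arr.length - t)).find? (fun k => decide (psum arr k = psum arr i)) with
  | some k => [strseg arr i k]
  | none => []

def gseg (arr : List Int) (i : Nat) : List String := gsegFrom arr i i

theorem psum_succ (arr : List Int) (t : Nat) (ht : t < arr.length) :
    psum arr (t + 1) = psum arr t + arr.getD t 0 := by
  unfold psum
  rw [List.take_add_one, List.sum_append, List.getElem?_eq_getElem ht]
  simp [List.getD_eq_getElem?_getD, List.getElem?_eq_getElem ht]

theorem gsegFrom_len (arr : List Int) (i : Nat) :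
    gsegFrom arr i arr.length = [] := by
  simp [gsegFrom]

-- A's inner loop computes gsegFrom
theorem sumZeroGo_eq (arr : List Int) (i : Nat) :
    ∀ (m t : Nat), t + m = arr.length → ∀ res,
    sumZeroGo arr (i : Int) (PySem.List.pyRange (t : Int) (arr.length : Int) 1)
      (psum arr t - psum arr i) res = res ++ gsegFrom arr i t := by
  intro m
  induction m with
  | zero =>
      intro t ht res
      have h : (t : Int) = (arr.length : Int) := by omega
      have hn : t = arr.length := by omega
      rw [h, hn]
      simp [sumZeroGo, gsegFrom_len]
  | succ m ih =>
      intro t ht res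
      have hlt : (t : Int) < (arr.length : Int) := by exact_mod_cast (by omega : t < arr.length)
      rw [PySem.List.pyRange_one_cons hlt]
      have hgt : PySem.List.pyGetD arr (t : Int) 0 = arr.getD t 0 := PySem.List.pyGetD_natCast arr t 0
      have hsum : psum arr t - psum arr i + PySem.List.pyGetD arr (t : Int) 0
          = psum arr (t + 1) - psum arr i := by
        rw [hgt, psum_succ arr t (by omega)]; ring
      have hrange : arr.length - t = (arr.length - (t + 1)) + 1 := by omega
      by_cases h0 : psum arr (t + 1) = psum arr i
      · simp only [sumZeroGo, hsum, sub_eq_zero]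
        rw [if_pos h0]
        simp only [gsegFrom, hrange, List.range'_succ]
        rw [List.find?_cons]
        rw [decide_eq_true h0,
          (by push_cast; ring : ((t : Int) + 1) = ((t + 1 : Nat) : Int))]
        rfl
      · simp only [sumZeroGo, hsum, sub_eq_zero]
        rw [if_neg h0]
        have hcast : ((t : Int) + 1) = ((t + 1 : Nat) : Int) := by push_cast; ring
        rw [hcast, ih (t + 1) (by omega) res]
        conv_rhs => rw [gsegFrom, hrange, List.range'_succ, List.find?_cons]
        rw [decide_eq_false h0]
        rfl

theorem sumZero_eq_flatMap (arr : List Int) :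
    sumZero arr = (List.range arr.length).flatMap (gseg arr) := by
  unfold sumZero
  rw [PySem.List.pyRange_zero_natCast, List.foldl_map]
  rw [PySem.List.foldl_congr_mem _ _ (fun res (i : Nat) => res ++ gseg arr i) _ ?_]
  · rw [PySem.List.foldl_append_eq_flatMap]; simp
  · intro res i hi
    have hi' : i ≤ arr.length := le_of_lt (List.mem_range.mp hi)
    have h0 : (0 : Int) = psum arr i - psum arr i := by ring
    rw [h0, sumZeroGo_eq arr i (arr.length - i) i (by omega) res]
    rfl

-- prefix list lookups are psum
theorem prefixSumsB_getD (arr : List Int) :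
    ∀ (a : Int) (k : Nat), k ≤ arr.length → (prefixSumsB a arr).getD k 0 = a + psum arr k := by
  induction arr with
  | nil =>
      intro a k hk
      have : k = 0 := by simpa using hk
      subst this; simp [prefixSumsB, psum]
  | cons x xs ih =>
      intro a k hk
      cases k with
      | zero => simp [prefixSumsB, psum]
      | succ k =>
          have h := ih (a + x) k (by simpa using hk)
          simp only [prefixSumsB, List.getD_cons_succ, h, psum, List.take_succ_cons, List.sum_cons]
          ring

theorem prefixSumsB_pyGetD (arr : List Int) (k : Nat) (hk : k ≤ arr.length) :
    PySem.List.pyGetD (prefixSumsB 0 arr) (k : Int) 0 = psum arr k := by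
  rw [PySem.List.pyGetD_natCast]
  simpa using prefixSumsB_getD arr 0 k hk

-- descending range(n-1, -1, -1)
theorem descRange_succ (m : Nat) :
    PySem.List.pyRange (((m + 1 : Nat) : Int) - 1) (-1) (-1)
      = ((m : Nat) : Int) :: PySem.List.pyRange ((m : Int) - 1) (-1) (-1) := by
  simp only [PySem.List.pyRange]
  norm_num
  rw [if_pos (by omega : (-1:Int) < (m:Int))]
  have h2 : (if 0 < m then m else 0) = m := by split_ifs <;> omega
  rw [h2, List.range_succ_eq_map, List.map_cons, List.map_map]
  congr 1
  simp
  intro a _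
  ring

theorem descRange_eq (n : Nat) :
    PySem.List.pyRange ((n : Int) - 1) (-1) (-1) = List.map (fun k : Nat => (k : Int)) (List.range n).reverse := by
  induction n with
  | zero => simp [PySem.List.pyRange]
  | succ n ih =>
      rw [descRange_succ n, ih, List.range_succ]
      simp

-- invariant of B's map: it answers "smallest index in [m, arr.length] carrying this prefix value"
def InvB (arr : List Int) (m : Nat) (nxt : PySem.Dict Int Int) : Prop :=
  ∀ v : Int, nxt.get? v =
    ((List.range' m (arr.length - m + 1)).find? (fun k => decide (psum arr k = v))).map (fun k => (k : Int))

theorem InvB_init (arr : List Int) :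
    InvB arr arr.length ((PySem.Dict.empty).insert (psum arr arr.length) (arr.length : Int)) := by
  intro v
  rw [PySem.Dict.get?_insert]
  have : arr.length - arr.length + 1 = 1 := by omega
  rw [this]
  simp only [List.range'_one, List.find?_cons, List.find?_nil]
  by_cases h : v = psum arr arr.length
  · simp [h]
  · simp [h, Ne.symm h]

theorem InvB_step (arr : List Int) (m : Nat) (hm : m < arr.length) (nxt : PySem.Dict Int Int)
    (H : InvB arr (m + 1) nxt) : InvB arr m (nxt.insert (psum arr m) (m : Int)) := by
  intro v
  rw [PySem.Dict.get?_insert]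
  have hr : arr.length - m + 1 = (arr.length - m) + 1 := by omega
  rw [hr, List.range'_succ, List.find?_cons]
  have hr2 : arr.length - (m + 1) + 1 = arr.length - m := by omega
  by_cases h : v = psum arr m
  · simp [h]
  · have hd : (decide (psum arr m = v)) = false := by
      simp; intro hh; exact h (Eq.symm hh)
    rw [if_neg h, hd, H v, hr2]

-- B's loop computes the reversed concatenation of the per-start segments
theorem sumZeroAltGo_eq (arr : List Int) :
    ∀ (m : Nat), m ≤ arr.length → ∀ (nxt : PySem.Dict Int Int) (res : List String),
    InvB arr m nxt →
    sumZeroAltGo arr (prefixSumsB 0 arr) (List.map (fun k : Nat => (k : Int)) (List.range m).reverse) nxt res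
      = res ++ ((List.range m).flatMap (gseg arr)).reverse := by
  intro m
  induction m with
  | zero => intro _ nxt res _; simp [sumZeroAltGo]
  | succ m ih =>
      intro hm nxt res H
      rw [List.range_succ]
      simp only [List.reverse_append, List.reverse_cons, List.reverse_nil, List.nil_append,
        List.cons_append, List.map_cons]
      simp only [sumZeroAltGo]
      rw [prefixSumsB_pyGetD arr m (by omega)]
      have Hm : nxt.get? (psum arr m) =
          ((List.range' (m + 1) (arr.length - m)).find? (fun k => decide (psum arr k = psum arr m))).map
            (fun k => (k : Int)) := by
        rw [H (psum arr m)]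
        have : arr.length - (m + 1) + 1 = arr.length - m := by omega
        rw [this]
      have hg : gseg arr m = match (List.range' (m + 1) (arr.length - m)).find?
          (fun k => decide (psum arr k = psum arr m)) with
        | some k => [strseg arr m k]
        | none => [] := rfl
      have step : (match nxt.get? (psum arr m) with
          | some k => res ++ [PySem.Str.join "," ((PySem.List.slice arr (some (m : Int)) (some k)).map PySem.Int.toStr)]
          | none => res) = res ++ gseg arr m := by
        rw [Hm, hg]
        cases hfind : (List.range' (m + 1) (arr.length - m)).find?
            (fun k => decide (psum arr k = psum arr m)) with
        | none => simp
        | some k => simp [strseg]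
      rw [step]
      rw [ih (by omega) _ _ (InvB_step arr m (by omega) nxt H)]
      rw [List.flatMap_append]
      simp only [List.reverse_append, List.append_assoc]
      congr 1
      have : (gseg arr m).reverse = gseg arr m := by
        unfold gseg gsegFrom
        cases (List.range' (m + 1) (arr.length - m)).find?
            (fun k => decide (psum arr k = psum arr m)) <;> simp
      simp [this]

theorem sumZero_alt_eq_flatMap (arr : List Int) :
    sumZero_alt arr = (List.range arr.length).flatMap (gseg arr) := by
  unfold sumZero_alt
  rw [descRange_eq, prefixSumsB_pyGetD arr arr.length (le_refl _)]
  rw [sumZeroAltGo_eq arr arr.length (le_refl _) _ _ (InvB_init arr)]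
  simp

-- ===== VERDICT (by name: the statement is the Claim_ definition above) =====
theorem sumZero_spec : Claim_equal_sumZero := by
  intro arr _
  unfold Spec_sumZero
  rw [sumZero_eq_flatMap, sumZero_alt_eq_flatMap]
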